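-- pv_equiv track=rewrite | github.com/skyrim4ev3r/leetcode_solutions | algorithms/2_medium/M/03634_minimum_removals_to_balance_array/two_pointers.py | minRemoval
-- ===== SOURCE A (Python) =====
-- from typing import List
--
-- def minRemoval(nums: List[int], k: int) -> int:
--     nums.sort()
--
--     n = len(nums)
--     left = 0
--     max_window = 0
--
--     for right in range(n):
--         # No need to use while
--         # Using 'if' to keep window size as max_window
--         if nums[left] * k < nums[right]:
--             left += 1
--
--         max_window = max(max_window, right - left + 1)
--
--     return n - max_window
-- ===== SOURCE B (Python) =====
-- def minRemoval(nums, k):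
--     # Sorts nums in place (same observable mutation as the original).
--     nums.sort()
--     best = 0
--     for right in range(len(nums)):
--         # binary search: smallest l in [0, right+1) with k*nums[l] >= nums[right]
--         lo, hi = 0, right + 1
--         while lo < hi:
--             mid = (lo + hi) // 2
--             if k * nums[mid] >= nums[right]:
--                 hi = mid
--             else:
--                 lo = mid + 1
--         best = max(best, right - lo + 1)
--     return len(nums) - best
-- ===== Notes on version B (the rewrite author's own statement) =====
-- stated objective: alternative
-- what changed: A's single-step two-pointer advance is replaced by an independent binary search, for each right index, for the smallest valid window start; the answer is n minus the best window length.
-- outside the precondition, e.g. on minRemoval([2, -6, 0], -1): A returns 0, B returns 1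
import Mathlib
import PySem

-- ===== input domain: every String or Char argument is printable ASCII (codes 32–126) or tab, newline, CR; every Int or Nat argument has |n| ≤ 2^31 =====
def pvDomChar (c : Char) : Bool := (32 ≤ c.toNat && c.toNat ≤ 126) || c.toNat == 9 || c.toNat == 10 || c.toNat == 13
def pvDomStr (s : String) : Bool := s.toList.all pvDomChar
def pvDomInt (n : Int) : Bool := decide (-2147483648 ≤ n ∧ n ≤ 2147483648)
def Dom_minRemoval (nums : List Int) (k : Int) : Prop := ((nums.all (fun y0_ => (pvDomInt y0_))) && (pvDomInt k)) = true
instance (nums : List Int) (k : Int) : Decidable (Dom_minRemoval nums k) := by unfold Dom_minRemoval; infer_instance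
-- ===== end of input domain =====

-- B replaces A's one-step pointer advance by a per-index binary search for the window start
-- (objective: alternative decomposition, same sort-dominated cost). Both A and B sort nums
-- in place in Python; the equivalence proved here is about the return value only.

-- ===== PORT A =====
-- loop body of A's for-loop: state = (left, max_window)
def stepA (s : List Int) (k : Int) (st : Int × Int) (right : Int) : Int × Int :=
  -- if nums[left] * k < nums[right]: left += 1   (both indices are in range on every iteration)
  -- max_window = max(max_window, right - left + 1)
  if PySem.List.pyGetD s st.1 0 * k < PySem.List.pyGetD s right 0
  then (st.1 + 1, max st.2 (right - (st.1 + 1) + 1))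
  else (st.1, max st.2 (right - st.1 + 1))

def minRemoval (nums : List Int) (k : Int) : Int :=
  let s := PySem.List.sorted nums id           -- nums.sort()
  let n : Int := (s.length : Int)
  let st := (PySem.List.pyRange 0 n).foldl (stepA s k) (0, 0)
  n - st.2

-- ===== PORT B =====
-- while lo < hi: mid = (lo+hi)//2; if k*nums[mid] >= nums[right]: hi = mid else: lo = mid+1
def bsearchLow (s : List Int) (k t lo hi : Int) : Int :=
  if h : lo < hi then
    -- mid = (lo + hi) // 2
    if k * PySem.List.pyGetD s (PySem.Int.floordiv (lo + hi) 2) 0 ≥ t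
    then bsearchLow s k t lo (PySem.Int.floordiv (lo + hi) 2)
    else bsearchLow s k t (PySem.Int.floordiv (lo + hi) 2 + 1) hi
  else lo
termination_by (hi - lo).toNat
decreasing_by
  · have h1 := (PySem.Int.floordiv_two_mid_bounds (le_of_lt h)).1
    have h2 := (PySem.Int.floordiv_lt_iff_lt_mul (a := lo + hi) (b := 2) (q := hi) (by omega)).2 (by omega)
    omega
  · have h1 := (PySem.Int.floordiv_two_mid_bounds (le_of_lt h)).1
    have h2 := (PySem.Int.floordiv_lt_iff_lt_mul (a := lo + hi) (b := 2) (q := hi) (by omega)).2 (by omega)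
    omega

-- loop body of B's for-loop: accumulator = best
def stepB (s : List Int) (k : Int) (best right : Int) : Int :=
  max best (right - bsearchLow s k (PySem.List.pyGetD s right 0) 0 (right + 1) + 1)

def minRemoval_alt (nums : List Int) (k : Int) : Int :=
  let s := PySem.List.sorted nums id           -- nums.sort()
  let n : Int := (s.length : Int)
  let best := (PySem.List.pyRange 0 n).foldl (stepB s k) 0
  n - best

-- ===== PRECONDITION & SPEC =====
-- Pre_ excludes negative k, outside the problem's natural domain (the balance bound k is a
-- nonnegative factor): there the threshold k*nums[l] is no longer monotone over the sorted
-- array, and A's pointer value and B's binary-search value are both accidental.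
def Pre_minRemoval (nums : List Int) (k : Int) : Prop := 0 ≤ k
instance (nums : List Int) (k : Int) : Decidable (Pre_minRemoval nums k) := by
  unfold Pre_minRemoval; infer_instance

def pvWitness_minRemoval : List Int × Int := ([1, 2, 4], 2)

def Spec_minRemoval (nums : List Int) (k : Int) (out : Int) : Prop := out = minRemoval_alt nums k
instance (nums : List Int) (k : Int) (out : Int) : Decidable (Spec_minRemoval nums k out) := by
  unfold Spec_minRemoval; infer_instance

-- ===== CLAIM (what is proved, stated in full; the proofs are below) =====
def Claim_equal_minRemoval : Prop := ∀ (nums : List Int) (k : Int), Dom_minRemoval nums k → Pre_minRemoval nums k → Spec_minRemoval nums k (minRemoval nums k)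

-- ===== LEMMAS AND PROOFS =====

-- abbreviation used throughout the proofs: element access of the sorted list
def gval (s : List Int) (i : Int) : Int := PySem.List.pyGetD s i 0

-- the sorted list is monotone under gval on in-range indices
lemma gval_mono (nums : List Int) {i j : Int} (h0 : 0 ≤ i) (hij : i ≤ j)
    (hj : j < ((PySem.List.sorted nums id).length : Int)) :
    gval (PySem.List.sorted nums id) i ≤ gval (PySem.List.sorted nums id) j := by
  set s := PySem.List.sorted nums id with hs
  have hp : List.Pairwise (fun a b => a ≤ b) s := by
    simpa using PySem.List.sorted_pairwise nums id
  have hi : i < (s.length : Int) := lt_of_le_of_lt hij hj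
  have h0j : 0 ≤ j := le_trans h0 hij
  rw [gval, gval, PySem.List.pyGetD_eq_getElem s 0 h0 hi,
      PySem.List.pyGetD_eq_getElem s 0 h0j hj]
  rcases eq_or_lt_of_le hij with rfl | hlt
  · exact le_refl _
  · exact (List.pairwise_iff_getElem.mp hp) i.toNat j.toNat (by omega) (by omega) (by omega)

-- unconditional facts about the binary search result: bounds, the element just below the
-- result fails the test, the element at the result (if inside) passes it
lemma bsearchLow_facts (s : List Int) (k t : Int) :
    ∀ fuel : Nat, ∀ lo hi : Int, (hi - lo).toNat ≤ fuel → lo ≤ hi →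
      lo ≤ bsearchLow s k t lo hi ∧ bsearchLow s k t lo hi ≤ hi ∧
      (lo < bsearchLow s k t lo hi → k * gval s (bsearchLow s k t lo hi - 1) < t) ∧
      (bsearchLow s k t lo hi < hi → k * gval s (bsearchLow s k t lo hi) ≥ t) := by
  intro fuel
  induction fuel with
  | zero =>
    intro lo hi hf hle
    have : lo = hi := by omega
    subst this
    rw [bsearchLow]
    simp
  | succ m ih =>
    intro lo hi hf hle
    rw [bsearchLow]
    by_cases h : lo < hi
    · rw [dif_pos h]
      have hmid1 := (PySem.Int.floordiv_two_mid_bounds (le_of_lt h)).1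
      have hmid2 := (PySem.Int.floordiv_lt_iff_lt_mul
        (a := lo + hi) (b := 2) (q := hi) (by omega)).2 (by omega)
      set mid := PySem.Int.floordiv (lo + hi) 2 with hm
      by_cases hp : k * PySem.List.pyGetD s mid 0 ≥ t
      · rw [if_pos hp]
        obtain ⟨h1, h2, h3, h4⟩ := ih lo mid (by omega) (by omega)
        refine ⟨h1, by omega, h3, ?_⟩
        intro hb
        by_cases hbm : bsearchLow s k t lo mid < mid
        · exact h4 hbm
        · have heq : bsearchLow s k t lo mid = mid := by omega
          rw [heq]; exact hp
      · rw [if_neg hp]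
        obtain ⟨h1, h2, h3, h4⟩ := ih (mid + 1) hi (by omega) (by omega)
        refine ⟨by omega, h2, ?_, h4⟩
        intro hb
        by_cases hbm : mid + 1 < bsearchLow s k t (mid + 1) hi
        · exact h3 hbm
        · have heq : bsearchLow s k t (mid + 1) hi = mid + 1 := by omega
          rw [heq]
          simpa [gval] using lt_of_not_ge hp
    · rw [dif_neg h]
      refine ⟨le_refl _, hle, ?_, ?_⟩ <;> intro hb <;> omega

-- main loop invariant: after processing indices 0..r-1 of the sorted list, A's state
-- (left, maxA) and B's accumulator maxB satisfy: 0 ≤ left ≤ r, maxA = maxB,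
-- r - left ≤ maxA, 0 ≤ maxA, and every l < left fails the test against index r-1.
lemma loop_invariant (nums : List Int) (k : Int) (hk : 0 ≤ k) :
    ∀ r : Nat, r ≤ (PySem.List.sorted nums id).length →
      0 ≤ ((PySem.List.pyRange 0 (r : Int)).foldl (stepA (PySem.List.sorted nums id) k) (0, 0)).1 ∧
      ((PySem.List.pyRange 0 (r : Int)).foldl (stepA (PySem.List.sorted nums id) k) (0, 0)).1 ≤ (r : Int) ∧
      ((PySem.List.pyRange 0 (r : Int)).foldl (stepA (PySem.List.sorted nums id) k) (0, 0)).2 =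
        (PySem.List.pyRange 0 (r : Int)).foldl (stepB (PySem.List.sorted nums id) k) 0 ∧
      (r : Int) - ((PySem.List.pyRange 0 (r : Int)).foldl (stepA (PySem.List.sorted nums id) k) (0, 0)).1 ≤
        ((PySem.List.pyRange 0 (r : Int)).foldl (stepA (PySem.List.sorted nums id) k) (0, 0)).2 ∧
      0 ≤ ((PySem.List.pyRange 0 (r : Int)).foldl (stepA (PySem.List.sorted nums id) k) (0, 0)).2 ∧
      (∀ l : Int, 0 ≤ l →
        l < ((PySem.List.pyRange 0 (r : Int)).foldl (stepA (PySem.List.sorted nums id) k) (0, 0)).1 →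
        k * gval (PySem.List.sorted nums id) l < gval (PySem.List.sorted nums id) ((r : Int) - 1)) := by
  set s := PySem.List.sorted nums id with hs
  intro r
  induction r with
  | zero =>
    intro _
    rw [Nat.cast_zero, show PySem.List.pyRange (0 : Int) (0 : Int) = [] from
      PySem.List.pyRange_one_eq_nil (le_refl 0)]
    refine ⟨by simp, by simp, by simp, by simp, by simp, ?_⟩
    intro l hl0 hl
    simp only [List.foldl_nil] at hl
    exact absurd hl (by omega)
  | succ m ih =>
    intro hr
    have hm : m ≤ s.length := by omega
    have hmn : (m : Int) < (s.length : Int) := by exact_mod_cast hr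
    obtain ⟨h0, h1, h2, h3, h4, h5⟩ := ih hm
    set stA := (PySem.List.pyRange 0 (m : Int)).foldl (stepA s k) (0, 0) with hstA
    set maxB := (PySem.List.pyRange 0 (m : Int)).foldl (stepB s k) 0 with hmaxB
    have hsplit : PySem.List.pyRange 0 ((m : Int) + 1) =
        PySem.List.pyRange 0 (m : Int) ++ [(m : Int)] :=
      PySem.List.pyRange_one_succ_right (by omega)
    have hcast : ((m + 1 : Nat) : Int) = (m : Int) + 1 := by push_cast; ring
    rw [hcast, hsplit, List.foldl_append, List.foldl_append]
    simp only [List.foldl_cons, List.foldl_nil]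
    rw [← hstA, ← hmaxB, show (m : Int) + 1 - 1 = (m : Int) from by ring]
    -- invariant pushed forward to index m: every l < left fails the test at index m
    have hpush : ∀ l : Int, 0 ≤ l → l < stA.1 → k * gval s l < gval s (m : Int) := by
      intro l hl0 hl
      have hm1 : (0 : Int) ≤ (m : Int) - 1 := by omega
      have hlow := h5 l hl0 hl
      have hmono := gval_mono nums (i := (m : Int) - 1) (j := (m : Int)) hm1 (by omega) hmn
      rw [← hs] at hmono
      omega
    obtain ⟨b1, b2, b3, b4⟩ := bsearchLow_facts s k (gval s (m : Int))
      ((m : Int) + 1).toNat 0 ((m : Int) + 1) (by omega) (by omega)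
    set b := bsearchLow s k (gval s (m : Int)) 0 ((m : Int) + 1) with hb
    -- the tested predicate is monotone in the index (k ≥ 0 and s sorted)
    have hpredmono : ∀ i j : Int, 0 ≤ i → i ≤ j → j < (s.length : Int) →
        k * gval s i ≥ gval s (m : Int) → k * gval s j ≥ gval s (m : Int) := by
      intro i j hi0 hij hjn hpi
      have hmono := gval_mono nums hi0 hij hjn
      rw [← hs] at hmono
      nlinarith
    rw [stepB]
    have hbdef : bsearchLow s k (PySem.List.pyGetD s (m : Int) 0) 0 ((m : Int) + 1) = b := rfl
    rw [hbdef]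
    by_cases hc : PySem.List.pyGetD s stA.1 0 * k < PySem.List.pyGetD s (m : Int) 0
    · -- test fires: left advances; neither recorded maximum changes
      rw [stepA, if_pos hc]
      have hball : ∀ l : Int, 0 ≤ l → l ≤ stA.1 → k * gval s l < gval s (m : Int) := by
        intro l hl0 hl
        rcases eq_or_lt_of_le hl with rfl | hlt
        · simpa [gval, mul_comm] using hc
        · exact hpush l hl0 hlt
      have hbge : stA.1 + 1 ≤ b := by
        by_contra hcon
        have hblt : b < (m : Int) + 1 := by omega
        have hpb := b4 hblt
        have hnb := hball b b1 (by omega)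
        omega
      refine ⟨by omega, by omega, ?_, by omega, by omega, ?_⟩
      · have eA : max stA.2 ((m : Int) - (stA.1 + 1) + 1) = stA.2 := by omega
        have eB : max maxB ((m : Int) - b + 1) = maxB := by omega
        rw [eA, eB, h2]
      · intro l hl0 hl
        exact hball l hl0 (by omega)
    · -- test does not fire: window [left, m] is valid and b = left
      rw [stepA, if_neg hc]
      have hvalid : k * gval s stA.1 ≥ gval s (m : Int) := by
        have hnc : ¬ (gval s stA.1 * k < gval s (m : Int)) := hc
        nlinarith [not_lt.mp hnc]
      have hbeq : b = stA.1 := by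
        rcases lt_trichotomy b stA.1 with hlt | heq | hgt
        · exfalso
          have hblt : b < (m : Int) + 1 := by omega
          have hpb := b4 hblt
          have hnb := hpush b b1 hlt
          omega
        · exact heq
        · exfalso
          have hlo : 0 < b := by omega
          have hnb := b3 hlo
          have hpb : k * gval s (b - 1) ≥ gval s (m : Int) :=
            hpredmono stA.1 (b - 1) h0 (by omega) (by omega) hvalid
          omega
      refine ⟨by omega, by omega, ?_, by omega, by omega, ?_⟩
      · rw [hbeq, h2]
      · intro l hl0 hl
        exact hpush l hl0 hl

-- ===== VERDICT (by name: the statement is the Claim_ definition above) =====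
theorem minRemoval_spec : Claim_equal_minRemoval := by
  intro nums k _hdom hk
  unfold Spec_minRemoval minRemoval minRemoval_alt
  have h := loop_invariant nums k hk (PySem.List.sorted nums id).length (le_refl _)
  simp only [] at h ⊢
  omega
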